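-- pv_equiv track=rewrite | github.com/ishandutta2007/codeforces | cdkrot/normal/913/C.py | solve
-- ===== SOURCE A (Python) =====
-- def solve(a, l):
--     if l == 0:
--         return 0
--
--     if l == 1:
--         return a[0]
--
--     k = 0
--     while (2 ** k) < l:
--         k += 1
--
--     return min(a[k], a[k - 1] + solve(a, l - (2 ** (k - 1))))
-- ===== SOURCE B (Python) =====
-- def solve(a, l):
--     if l == 0:
--         return 0
--     total = 0
--     best = None
--     while l > 1:
--         k = (l - 1).bit_length()  # smallest k with 2**k >= l
--         c = total + a[k]
--         if best is None or c < best: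
--             best = c
--         total += a[k - 1]
--         l -= 2 ** (k - 1)
--     c = total + a[0]
--     return c if best is None or c < best else best
-- ===== Notes on version B (the rewrite author's own statement) =====
-- stated objective: simpler
-- what changed: Replaced A's recursion (min distributed over each level) by a single forward while-loop that keeps a running prefix sum of a[k-1] costs and a running minimum of stopping options, computing k via bit_length instead of a while loop.
-- outside the precondition, e.g. on solve([], 5): A raises IndexError, B raises IndexError; on solve([1], -2): A raises RecursionError, B returns 1
import Mathlib
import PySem

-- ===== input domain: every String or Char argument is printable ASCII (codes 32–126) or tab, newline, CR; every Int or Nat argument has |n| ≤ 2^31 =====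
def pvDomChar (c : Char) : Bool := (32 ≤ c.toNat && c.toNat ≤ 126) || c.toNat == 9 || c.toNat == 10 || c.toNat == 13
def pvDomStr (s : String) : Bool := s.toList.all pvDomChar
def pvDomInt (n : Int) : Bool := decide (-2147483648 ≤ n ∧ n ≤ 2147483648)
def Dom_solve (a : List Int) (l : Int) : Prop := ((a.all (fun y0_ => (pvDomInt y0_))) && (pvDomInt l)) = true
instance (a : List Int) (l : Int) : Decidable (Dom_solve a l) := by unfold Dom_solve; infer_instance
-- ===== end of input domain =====

-- B replaces A's recursive min-chain by a single forward loop keeping a running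
-- prefix sum and a running minimum (objective: simpler/iterative decomposition).

-- ===== PORT A =====
-- termination lemmas for the ports (cited by name in decreasing_by to keep the definitions small)
lemma pvDecK (l : Int) (k : Nat) (h : (2:Int) ^ k < l) :
    (l - 2 ^ (k + 1)).toNat < (l - 2 ^ k).toNat :=
  (Int.toNat_lt_toNat (sub_pos.2 h)).2
    (sub_lt_sub_left (pow_lt_pow_right₀ (by decide : (1:Int) < 2) (Nat.lt_succ_self k)) l)

lemma pvDecL (l : Int) (h : 1 < l) (k : Nat) : (l - 2 ^ k).toNat < l.toNat :=
  (Int.toNat_lt_toNat (lt_trans zero_lt_one h)).2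
    (sub_lt_self l (pow_pos (by decide : (0:Int) < 2) k))

-- 'k = 0; while (2 ** k) < l: k += 1'
def kloopA (l : Int) (k : Nat) : Nat :=
  if h : (2:Int) ^ k < l then kloopA l (k + 1) else k
termination_by (l - 2 ^ k).toNat
decreasing_by exact pvDecK l k h

def solve (a : List Int) (l : Int) : Int :=
  if l = 0 then 0
  else if l = 1 then PySem.List.pyGetD a 0 0
  else if h : 1 < l then
    let k := kloopA l 0
    min (PySem.List.pyGetD a (k : Int) 0)
        (PySem.List.pyGetD a ((k : Int) - 1) 0 + solve a (l - 2 ^ (k - 1)))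
  else 0  -- unreachable guard: Python diverges for l < 0 (excluded by Pre_solve)
termination_by l.toNat
decreasing_by exact pvDecL l h _

-- ===== PORT B =====
-- (l-1).bit_length(); exact for the nonnegative arguments B uses it on
def bitLength (n : Int) : Nat := n.toNat.size

def solveLoop (a : List Int) (l : Int) (total : Int) (best : Option Int) : Int :=
  if h : 1 < l then
    let k := bitLength (l - 1)
    let c := total + PySem.List.pyGetD a (k : Int) 0
    let best' := match best with
      | none => some c
      | some b => if c < b then some c else some b
    solveLoop a (l - 2 ^ (k - 1)) (total + PySem.List.pyGetD a ((k : Int) - 1) 0) best'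
  else
    let c := total + PySem.List.pyGetD a 0 0
    match best with
    | none => c
    | some b => if c < b then c else b
termination_by l.toNat
decreasing_by exact pvDecL l h _

def solve_alt (a : List Int) (l : Int) : Int :=
  if l = 0 then 0 else solveLoop a l 0 none

-- ===== PRECONDITION & SPEC =====
-- Pre_ excludes exactly the inputs where Python A does not return: l < 0 (the
-- while/recursion never terminates) and lists too short for the indices a[k]
-- reached from l (IndexError).
def Pre_solve (a : List Int) (l : Int) : Prop :=
  0 ≤ l ∧ (l = 0 ∨ (a ≠ [] ∧ l ≤ 2 ^ (a.length - 1)))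
instance (a : List Int) (l : Int) : Decidable (Pre_solve a l) := by unfold Pre_solve; infer_instance
def pvWitness_solve : List Int × Int := ([3, 5, 6], 3)

def Spec_solve (a : List Int) (l : Int) (out : Int) : Prop := out = solve_alt a l
instance (a : List Int) (l : Int) (out : Int) : Decidable (Spec_solve a l out) := by unfold Spec_solve; infer_instance

-- ===== CLAIM (what is proved, stated in full; the proofs are below) =====
def Claim_equal_solve : Prop := ∀ (a : List Int) (l : Int), Dom_solve a l → Pre_solve a l → Spec_solve a l (solve a l)

-- ===== LEMMAS AND PROOFS =====

-- 'best updated with c / final min against c', as a value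
def omin : Option Int → Int → Int
  | none, v => v
  | some b, v => if v < b then v else b

-- A's while loop computes the least k with 2^k ≥ l, i.e. (l-1).bit_length() for l ≥ 2
lemma kloopA_eq_aux (l : Int) (hl : 2 ≤ l) (n : Nat) :
    ∀ k, (l - 1).toNat.size - k = n → k ≤ (l - 1).toNat.size → kloopA l k = (l - 1).toNat.size := by
  have hcast : ((l - 1).toNat : Int) = l - 1 := Int.toNat_of_nonneg (by omega)
  induction n with
  | zero =>
    intro k h1 h2
    have hk : k = (l - 1).toNat.size := by omega
    have hlt : (l - 1).toNat < 2 ^ k := by rw [hk]; exact Nat.lt_size_self _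
    have hni : ¬ (2:Int) ^ k < l := by
      have h3 : (l - 1 : Int) < (2:Int) ^ k := by
        calc (l - 1 : Int) = ((l - 1).toNat : Int) := hcast.symm
          _ < (((2:Nat) ^ k : Nat) : Int) := by exact_mod_cast hlt
          _ = (2:Int) ^ k := by push_cast; ring
      omega
    rw [kloopA.eq_def, dif_neg hni, hk]
  | succ n ih =>
    intro k h1 h2
    have hk : k < (l - 1).toNat.size := by omega
    have hge : 2 ^ k ≤ (l - 1).toNat := Nat.lt_size.1 hk
    have hlt : (2:Int) ^ k < l := by
      have h3 : (((2:Nat) ^ k : Nat) : Int) ≤ ((l - 1).toNat : Int) := by exact_mod_cast hge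
      rw [hcast] at h3
      push_cast at h3
      omega
    rw [kloopA.eq_def, dif_pos hlt]
    exact ih (k + 1) (by omega) (by omega)

lemma kloopA_eq (l : Int) (hl : 2 ≤ l) : kloopA l 0 = (l - 1).toNat.size :=
  kloopA_eq_aux l hl _ 0 rfl (Nat.zero_le _)

lemma size_pos_of (l : Int) (hl : 2 ≤ l) : 1 ≤ (l - 1).toNat.size :=
  Nat.size_pos.2 (by omega)

lemma sub_pow_lt (l : Int) (hl : 2 ≤ l) : 1 ≤ l - 2 ^ ((l - 1).toNat.size - 1) := by
  have h1 : 1 ≤ (l - 1).toNat.size := size_pos_of l hl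
  have h2 : (l - 1).toNat.size - 1 < (l - 1).toNat.size := by omega
  have h3 : 2 ^ ((l - 1).toNat.size - 1) ≤ (l - 1).toNat := Nat.lt_size.1 h2
  have hcast : ((l - 1).toNat : Int) = l - 1 := Int.toNat_of_nonneg (by omega)
  have h4 : (((2:Nat) ^ ((l - 1).toNat.size - 1) : Nat) : Int) ≤ ((l - 1).toNat : Int) := by
    exact_mod_cast h3
  rw [hcast] at h4
  push_cast at h4
  omega

-- unfolding equations for the two ports
lemma solve_step (a : List Int) (l : Int) (h : 1 < l) :
    solve a l = min (PySem.List.pyGetD a ((kloopA l 0 : Nat) : Int) 0)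
      (PySem.List.pyGetD a (((kloopA l 0 : Nat) : Int) - 1) 0 + solve a (l - 2 ^ (kloopA l 0 - 1))) := by
  rw [solve.eq_def]
  simp only [show ¬ l = 0 by omega, show ¬ l = 1 by omega, if_false, h, dif_pos]

lemma solveLoop_step (a : List Int) (l total : Int) (best : Option Int) (h : 1 < l) :
    solveLoop a l total best =
      solveLoop a (l - 2 ^ (bitLength (l - 1) - 1))
        (total + PySem.List.pyGetD a (((bitLength (l - 1) : Nat) : Int) - 1) 0)
        (some (omin best (total + PySem.List.pyGetD a ((bitLength (l - 1) : Nat) : Int) 0))) := by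
  rw [solveLoop.eq_def]
  simp only [h, dif_pos]
  cases best with
  | none => rfl
  | some b => simp only [omin]; split_ifs <;> rfl

lemma solveLoop_exit (a : List Int) (l total : Int) (best : Option Int) (h : ¬ 1 < l) :
    solveLoop a l total best = omin best (total + PySem.List.pyGetD a 0 0) := by
  rw [solveLoop.eq_def]
  simp only [h, dif_neg, not_false_iff]
  cases best with
  | none => rfl
  | some b => simp only [omin]

-- loop invariant: the running (total, best) state computes omin best (total + solve a l)
lemma loop_eq (a : List Int) : ∀ (n : Nat) (l : Int), l.toNat = n → 1 ≤ l →
    ∀ (total : Int) (best : Option Int),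
      solveLoop a l total best = omin best (total + solve a l) := by
  intro n
  induction n using Nat.strong_induction_on with
  | _ n ih =>
    intro l hn hl total best
    by_cases h1 : 1 < l
    · have hl2 : 2 ≤ l := by omega
      have hk : bitLength (l - 1) = kloopA l 0 := by
        rw [bitLength, kloopA_eq l hl2]
      rw [solveLoop_step a l total best h1, hk, solve_step a l h1]
      set K := kloopA l 0 with hK
      have hl' : 1 ≤ l - 2 ^ (K - 1) := by
        have := sub_pow_lt l hl2
        rw [← kloopA_eq l hl2] at this
        exact this
      have hpow : (0:Int) < 2 ^ (K - 1) := pow_pos (by norm_num) _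
      rw [ih (l - 2 ^ (K - 1)).toNat (by omega) (l - 2 ^ (K - 1)) rfl hl']
      cases best <;> simp only [omin, min_def] <;> split_ifs <;> omega
    · have hl1 : l = 1 := by omega
      subst hl1
      rw [solveLoop_exit a 1 total best h1]
      rw [solve.eq_def]
      norm_num

-- ===== VERDICT (by name: the statement is the Claim_ definition above) =====
theorem solve_spec : Claim_equal_solve := by
  intro a l _hdom hpre
  unfold Spec_solve solve_alt
  rcases hpre with ⟨hl0, _⟩
  by_cases h0 : l = 0
  · subst h0
    rw [solve.eq_def]
    simp
  · have h1 : 1 ≤ l := by omega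
    rw [if_neg h0, loop_eq a l.toNat l rfl h1 0 none]
    simp [omin]
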